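-- pv_equiv track=rewrite | github.com/Relaxe111/cdc-pipeline-generator | cdc_generator/cli/completions_map_columns.py | mapped_map_column_state
-- ===== SOURCE A (Python) =====
-- def mapped_map_column_state(
--     values: list[str],
-- ) -> tuple[set[str], set[str], str | None]:
--     """Return mapped targets/sources and pending legacy source token."""
--     mapped_targets: set[str] = set()
--     mapped_sources: set[str] = set()
--     pending_legacy_source: str | None = None
--
--     for value in values:
--         if ":" in value:
--             target_name_raw, source_name_raw = value.split(":", 1)
--             target_name = target_name_raw.strip()
--             source_name = source_name_raw.strip()
--             if target_name:
--                 mapped_targets.add(target_name.casefold())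
--             if source_name:
--                 mapped_sources.add(source_name.casefold())
--         else:
--             pending_legacy_source = value
--
--     return mapped_targets, mapped_sources, pending_legacy_source
-- ===== SOURCE B (Python) =====
-- def mapped_map_column_state(values):
--     """Table-first: split pairs once, then derive each output in its own pass."""
--     pairs = [tuple(v.split(":", 1)) for v in values if ":" in v]
--     mapped_targets = {t.strip().casefold() for t, _ in pairs if t.strip()}
--     mapped_sources = {s.strip().casefold() for _, s in pairs if s.strip()}
--     pending_legacy_source = next((v for v in reversed(values) if ":" not in v), None)
--     return mapped_targets, mapped_sources, pending_legacy_source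
-- ===== Notes on version B (the rewrite author's own statement) =====
-- stated objective: alternative
-- what changed: Replaces the single stateful loop by a table-first derivation: a list of split pairs built once, two independent set comprehensions over it, and the legacy token found by scanning the list in reverse.
import Mathlib
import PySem

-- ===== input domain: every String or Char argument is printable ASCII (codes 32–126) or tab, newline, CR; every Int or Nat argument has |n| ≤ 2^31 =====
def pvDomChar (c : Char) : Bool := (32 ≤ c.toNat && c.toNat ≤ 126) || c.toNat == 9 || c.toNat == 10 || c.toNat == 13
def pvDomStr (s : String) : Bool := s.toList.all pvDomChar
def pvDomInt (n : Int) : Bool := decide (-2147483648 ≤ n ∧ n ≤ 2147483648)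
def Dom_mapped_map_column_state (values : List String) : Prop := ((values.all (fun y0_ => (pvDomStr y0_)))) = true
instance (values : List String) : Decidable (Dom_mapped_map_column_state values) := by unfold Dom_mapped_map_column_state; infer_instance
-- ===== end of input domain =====

-- B replaces the single stateful loop by a table of split pairs built once plus
-- independent passes per output; 'casefold' is ported as 'lower' (identical on the ASCII domain).

-- ===== PORT A =====
-- one loop step of A's for-loop over its (targets, sources, pending) state
def pvStepA (st : PySem.Set String × PySem.Set String × Option String) (value : String) :
    PySem.Set String × PySem.Set String × Option String :=
  if PySem.Str.isIn ":" value then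
    let parts := (PySem.Str.splitMax? value ":" 1).getD []
    let target_name := PySem.Str.strip (parts.getD 0 "")
    let source_name := PySem.Str.strip (parts.getD 1 "")
    let mt := if target_name ≠ "" then PySem.Set.add st.1 (PySem.Str.lower target_name) else st.1
    let ms := if source_name ≠ "" then PySem.Set.add st.2.1 (PySem.Str.lower source_name) else st.2.1
    (mt, ms, st.2.2)
  else
    (st.1, st.2.1, some value)

def mapped_map_column_state (values : List String) : List String × List String × Option String :=
  values.foldl pvStepA (PySem.Set.empty, PySem.Set.empty, none)

-- ===== PORT B =====
def mapped_map_column_state_alt (values : List String) : List String × List String × Option String :=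
  let pairs := (values.filter (fun v => PySem.Str.isIn ":" v)).map
      (fun v =>
        let parts := (PySem.Str.splitMax? v ":" 1).getD []
        (parts.getD 0 "", parts.getD 1 ""))
  let mapped_targets := PySem.Set.ofList
      ((pairs.filter (fun p => PySem.Str.strip p.1 ≠ "")).map
        (fun p => PySem.Str.lower (PySem.Str.strip p.1)))
  let mapped_sources := PySem.Set.ofList
      ((pairs.filter (fun p => PySem.Str.strip p.2 ≠ "")).map
        (fun p => PySem.Str.lower (PySem.Str.strip p.2)))
  let pending_legacy_source := values.reverse.find? (fun v => ¬ PySem.Str.isIn ":" v)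
  (mapped_targets, mapped_sources, pending_legacy_source)

-- ===== PRECONDITION & SPEC =====
def Spec_mapped_map_column_state (values : List String) (out : List String × List String × Option String) : Prop := out = mapped_map_column_state_alt values
instance (values : List String) (out : List String × List String × Option String) : Decidable (Spec_mapped_map_column_state values out) := by unfold Spec_mapped_map_column_state; infer_instance

-- ===== CLAIM (what is proved, stated in full; the proofs are below) =====
def Claim_equal_mapped_map_column_state : Prop := ∀ (values : List String), Dom_mapped_map_column_state values → Spec_mapped_map_column_state values (mapped_map_column_state values)

-- ===== LEMMAS AND PROOFS =====

-- B's target-token / source-token lists, as functions (for the loop invariant)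
def pvTgts (values : List String) : List String :=
  (((values.filter (fun v => PySem.Str.isIn ":" v)).map
      (fun v =>
        let parts := (PySem.Str.splitMax? v ":" 1).getD []
        (parts.getD 0 "", parts.getD 1 "")) ).filter (fun p => PySem.Str.strip p.1 ≠ "")).map
    (fun p => PySem.Str.lower (PySem.Str.strip p.1))

def pvSrcs (values : List String) : List String :=
  (((values.filter (fun v => PySem.Str.isIn ":" v)).map
      (fun v =>
        let parts := (PySem.Str.splitMax? v ":" 1).getD []
        (parts.getD 0 "", parts.getD 1 "")) ).filter (fun p => PySem.Str.strip p.2 ≠ "")).map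
    (fun p => PySem.Str.lower (PySem.Str.strip p.2))

def pvLast (values : List String) (pls : Option String) : Option String :=
  match values.reverse.find? (fun v => ¬ PySem.Str.isIn ":" v) with
  | some v => some v
  | none => pls

lemma pvLast_cons (v : String) (vs : List String) (pls : Option String) :
    pvLast (v :: vs) pls =
      pvLast vs (if PySem.Str.isIn ":" v then pls else some v) := by
  unfold pvLast
  simp only [List.reverse_cons, List.find?_append]
  cases h : vs.reverse.find? (fun v => ¬ PySem.Str.isIn ":" v) with
  | some w => simp [h]
  | none =>
    by_cases hcx : PySem.Chars.isIn [':'] v.toList <;>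
      simp [List.find?, PySem.Str.isIn_eq, hcx]

lemma pvUpdate_append (s : PySem.Set String) (a b : List String) :
    PySem.Set.update s (a ++ b) = PySem.Set.update (PySem.Set.update s a) b := by
  simp [PySem.Set.update]

lemma pvTgts_cons_pos (v : String) (vs : List String)
    (hc : PySem.Chars.isIn [':'] v.toList = true) :
    pvTgts (v :: vs) =
      (if PySem.Str.strip (((PySem.Str.splitMax? v ":" 1).getD [])[0]?.getD "") = "" then []
       else [PySem.Str.lower
          (PySem.Str.strip (((PySem.Str.splitMax? v ":" 1).getD [])[0]?.getD ""))]) ++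
      pvTgts vs := by
  by_cases ht : PySem.Str.strip (((PySem.Str.splitMax? v ":" 1).getD [])[0]?.getD "") = "" <;>
    simp [pvTgts, hc, ht]

lemma pvSrcs_cons_pos (v : String) (vs : List String)
    (hc : PySem.Chars.isIn [':'] v.toList = true) :
    pvSrcs (v :: vs) =
      (if PySem.Str.strip (((PySem.Str.splitMax? v ":" 1).getD [])[1]?.getD "") = "" then []
       else [PySem.Str.lower
          (PySem.Str.strip (((PySem.Str.splitMax? v ":" 1).getD [])[1]?.getD ""))]) ++
      pvSrcs vs := by
  by_cases hs : PySem.Str.strip (((PySem.Str.splitMax? v ":" 1).getD [])[1]?.getD "") = "" <;>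
    simp [pvSrcs, hc, hs]

lemma pvTgts_cons_neg (v : String) (vs : List String)
    (hc : PySem.Chars.isIn [':'] v.toList = false) :
    pvTgts (v :: vs) = pvTgts vs := by
  simp [pvTgts, hc]

lemma pvSrcs_cons_neg (v : String) (vs : List String)
    (hc : PySem.Chars.isIn [':'] v.toList = false) :
    pvSrcs (v :: vs) = pvSrcs vs := by
  simp [pvSrcs, hc]

lemma pvLoop_eq (values : List String) (mt ms : PySem.Set String) (pls : Option String) :
    values.foldl pvStepA (mt, ms, pls) =
      (PySem.Set.update mt (pvTgts values), PySem.Set.update ms (pvSrcs values),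
        pvLast values pls) := by
  induction values generalizing mt ms pls with
  | nil => simp [pvTgts, pvSrcs, pvLast, PySem.Set.update]
  | cons v vs ih =>
    rw [List.foldl_cons, pvLast_cons]
    by_cases hc : PySem.Str.isIn ":" v
    · have hc2 : PySem.Chars.isIn [':'] v.toList = true := by simpa using hc
      rw [if_pos hc, pvTgts_cons_pos v vs hc2, pvSrcs_cons_pos v vs hc2,
        pvUpdate_append, pvUpdate_append]
      by_cases ht :
          PySem.Str.strip (((PySem.Str.splitMax? v ":" 1).getD [])[0]?.getD "") = "" <;>
        by_cases hs :
            PySem.Str.strip (((PySem.Str.splitMax? v ":" 1).getD [])[1]?.getD "") = "" <;>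
          simp [pvStepA, hc2, ht, hs, ih, PySem.Set.update]
    · have hc2 : PySem.Chars.isIn [':'] v.toList = false := by
        cases h : PySem.Chars.isIn [':'] v.toList
        · rfl
        · exact absurd (by simpa using h) hc
      rw [if_neg hc, pvTgts_cons_neg v vs hc2, pvSrcs_cons_neg v vs hc2]
      have hstep : pvStepA (mt, ms, pls) v = (mt, ms, some v) := by
        simp [pvStepA, hc2]
      rw [hstep, ih]

-- ===== VERDICT (by name: the statement is the Claim_ definition above) =====
theorem mapped_map_column_state_spec : Claim_equal_mapped_map_column_state := by
  intro values _
  show mapped_map_column_state values = mapped_map_column_state_alt values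
  rw [mapped_map_column_state, pvLoop_eq]
  have hl : pvLast values none =
      values.reverse.find? (fun v => ¬ PySem.Str.isIn ":" v) := by
    unfold pvLast
    cases values.reverse.find? (fun v => ¬ PySem.Str.isIn ":" v) <;> rfl
  rw [hl]
  rfl
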